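-- pv_equiv track=rewrite | github.com/runshengdu/agentic_eval | review.py | extract_log_summary
-- ===== SOURCE A (Python) =====
-- from typing import Dict, List, Optional, Tuple, Set
--
-- def extract_log_summary(log_entries: List[Dict]) -> Tuple[Optional[str], Optional[str]]:
--     """Get (user_query, final_answer) from legacy-style log entries."""
--     user_query: Optional[str] = None
--     answer: Optional[str] = None
--     for it in log_entries:
--         t = (it.get("type") or "").lower()
--         if t == "user_query" and not user_query:
--             user_query = (it.get("content") or "").strip()
--         elif t == "answer" and not answer:
--             answer = (it.get("content") or "").strip()
--         # Early exit if both found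
--         if user_query and answer:
--             break
--     return user_query, answer
-- ===== SOURCE B (Python) =====
-- from typing import Dict, List, Optional, Tuple
--
-- def _find_first(log_entries: List[Dict], typ: str) -> Optional[str]:
--     """First non-empty stripped content of an entry of this type; '' if all
--     matching entries strip empty; None if no entry of this type exists."""
--     res: Optional[str] = None
--     for it in log_entries:
--         if (it.get("type") or "").lower() == typ:
--             res = (it.get("content") or "").strip()
--             if res:
--                 return res
--     return res
--
-- def extract_log_summary(log_entries: List[Dict]) -> Tuple[Optional[str], Optional[str]]:
--     return _find_first(log_entries, "user_query"), _find_first(log_entries, "answer")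
-- ===== Notes on version B (the rewrite author's own statement) =====
-- stated objective: simpler
-- what changed: Replaces the single interleaved loop carrying two optional states and a combined early-exit break by two independent single-purpose scans via a small helper _find_first(typ) that returns as soon as a non-empty stripped content is found.
import Mathlib
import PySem

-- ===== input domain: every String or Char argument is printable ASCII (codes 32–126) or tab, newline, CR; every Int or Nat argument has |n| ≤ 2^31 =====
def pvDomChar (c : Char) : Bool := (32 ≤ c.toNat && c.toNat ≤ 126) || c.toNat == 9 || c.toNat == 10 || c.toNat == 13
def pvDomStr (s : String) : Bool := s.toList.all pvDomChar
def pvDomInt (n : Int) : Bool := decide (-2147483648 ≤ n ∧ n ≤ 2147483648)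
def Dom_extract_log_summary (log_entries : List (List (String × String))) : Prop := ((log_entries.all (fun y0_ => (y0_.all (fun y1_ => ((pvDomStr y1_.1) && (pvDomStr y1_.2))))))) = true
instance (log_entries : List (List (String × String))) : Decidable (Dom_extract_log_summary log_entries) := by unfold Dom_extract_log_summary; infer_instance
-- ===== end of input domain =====

-- B replaces A's single interleaved loop (two optional states + combined break) by two
-- independent single-purpose scans via a helper; same cost, simpler (objective: simpler).

-- shared primitive: Python's (it.get(k) or "") on a string-valued dict
def pvGetS (it : List (String × String)) (k : String) : String :=
  PySem.Dict.getD ⟨it⟩ k ""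

-- Python truthiness of an Optional[str] state: falsy iff None or ""
def pvTruthy (o : Option String) : Bool := o.getD "" != ""

-- ===== PORT A =====
-- A's loop: state (user_query, answer), branch chain in source order, break when both truthy
def pvLoopA (l : List (List (String × String))) (uq ans : Option String) :
    Option String × Option String :=
  match l with
  | [] => (uq, ans)
  | it :: rest =>
    let t := PySem.Str.lower (pvGetS it "type")
    let st :=
      if t = "user_query" ∧ pvTruthy uq = false then
        (some (PySem.Str.strip (pvGetS it "content")), ans)
      else if t = "answer" ∧ pvTruthy ans = false then
        (uq, some (PySem.Str.strip (pvGetS it "content")))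
      else (uq, ans)
    if pvTruthy st.1 ∧ pvTruthy st.2 then st else pvLoopA rest st.1 st.2

def extract_log_summary (log_entries : List (List (String × String))) : Option String × Option String :=
  pvLoopA log_entries none none

-- ===== PORT B =====
-- B's helper _find_first: res accumulator, early return on non-empty stripped content
def pvFindFirst (l : List (List (String × String))) (typ : String) (res : Option String) :
    Option String :=
  match l with
  | [] => res
  | it :: rest =>
    if PySem.Str.lower (pvGetS it "type") = typ then
      let r := PySem.Str.strip (pvGetS it "content")
      if r ≠ "" then some r else pvFindFirst rest typ (some r)
    else pvFindFirst rest typ res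

def extract_log_summary_alt (log_entries : List (List (String × String))) : Option String × Option String :=
  (pvFindFirst log_entries "user_query" none, pvFindFirst log_entries "answer" none)

-- ===== PRECONDITION & SPEC =====
def Spec_extract_log_summary (log_entries : List (List (String × String))) (out : Option String × Option String) : Prop := out = extract_log_summary_alt log_entries
instance (log_entries : List (List (String × String))) (out : Option String × Option String) : Decidable (Spec_extract_log_summary log_entries out) := by unfold Spec_extract_log_summary; infer_instance

-- ===== CLAIM (what is proved, stated in full; the proofs are below) =====
def Claim_equal_extract_log_summary : Prop := ∀ (log_entries : List (List (String × String))), Dom_extract_log_summary log_entries → Spec_extract_log_summary log_entries (extract_log_summary log_entries)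

-- ===== LEMMAS AND PROOFS =====

-- A's interleaved loop decomposes into the two independent scans of B.
theorem pvLoopA_eq (l : List (List (String × String))) :
    ∀ uq ans : Option String,
      pvLoopA l uq ans =
        ((if pvTruthy uq then uq else pvFindFirst l "user_query" uq),
         (if pvTruthy ans then ans else pvFindFirst l "answer" ans)) := by
  induction l with
  | nil => intro uq ans; simp [pvLoopA, pvFindFirst]
  | cons it rest ih =>
    intro uq ans
    simp only [pvLoopA, pvFindFirst]
    set t := PySem.Str.lower (pvGetS it "type") with ht
    set r := PySem.Str.strip (pvGetS it "content") with hr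
    by_cases hU : t = "user_query"
    · have hA : t ≠ "answer" := by rw [hU]; decide
      by_cases huq : pvTruthy uq = false
      · simp only [hU, huq, and_true, if_pos]
        by_cases hrr : r = ""
        · simp [hrr, ih, pvTruthy]
        · have : pvTruthy (some r) = true := by simp [pvTruthy, hrr]
          by_cases hans : pvTruthy ans = true
          · simp [hrr, this, hans]
          · simp [hrr, this, hans, ih]
      · -- uq already truthy: neither branch fires (elif condition has t = "answer", false)
        simp only [hU, huq, true_and]
        have huq' : pvTruthy uq = true := by revert huq; cases pvTruthy uq <;> simp
        by_cases hans : pvTruthy ans = true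
        · simp [huq', hans]
        · simp [huq', hans, ih]
    · by_cases hA : t = "answer"
      · by_cases hans : pvTruthy ans = false
        · simp only [hA, hans, and_true, if_pos]
          by_cases hrr : r = ""
          · simp [hrr, ih, pvTruthy]
          · have : pvTruthy (some r) = true := by simp [pvTruthy, hrr]
            by_cases huq : pvTruthy uq = true
            · simp [hrr, this, huq]
            · simp [hrr, this, huq, ih]
        · have hans' : pvTruthy ans = true := by revert hans; cases pvTruthy ans <;> simp
          simp only [hA, hans]
          by_cases huq : pvTruthy uq = true
          · simp [huq, hans']
          · simp [huq, hans', ih]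
      · simp only [hU, hA, false_and, if_false]
        by_cases huq : pvTruthy uq = true <;> by_cases hans : pvTruthy ans = true <;>
          simp [huq, hans, ih]

-- ===== VERDICT (by name: the statement is the Claim_ definition above) =====
theorem extract_log_summary_spec : Claim_equal_extract_log_summary := by
  intro l _
  unfold Spec_extract_log_summary extract_log_summary extract_log_summary_alt
  rw [pvLoopA_eq]
  simp [pvTruthy]
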